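-- pv_equiv track=rewrite | github.com/Blueberry17/advent-of-code-2024 | src/day02/p2.py | diff_type
-- ===== SOURCE A (Python) =====
-- def diff_type(diffs):
--     pos_diffs = neg_diffs = non_diffs = big_diffs = 0
--     for diff in diffs:
--         if 1 <= diff <= 3:
--             pos_diffs += 1
--         elif -3 <= diff <= -1:
--             neg_diffs += 1
--         elif diff == 0:
--             non_diffs += 1
--         else:
--             big_diffs += 1
--
--     return pos_diffs, neg_diffs, non_diffs, big_diffs
-- ===== SOURCE B (Python) =====
-- def diff_type(diffs):
--     items = list(diffs)
--     pos = sum(1 for d in items if 1 <= d <= 3)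
--     neg = sum(1 for d in items if -3 <= d <= -1)
--     non = sum(1 for d in items if d == 0)
--     big = len(items) - pos - neg - non
--     return pos, neg, non, big
-- ===== Notes on version B (the rewrite author's own statement) =====
-- stated objective: idiomatic
-- what changed: A's single branching accumulator pass is replaced by independent per-bucket scans (comprehension counts) with the big bucket derived by subtraction from the length.
import Mathlib
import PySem

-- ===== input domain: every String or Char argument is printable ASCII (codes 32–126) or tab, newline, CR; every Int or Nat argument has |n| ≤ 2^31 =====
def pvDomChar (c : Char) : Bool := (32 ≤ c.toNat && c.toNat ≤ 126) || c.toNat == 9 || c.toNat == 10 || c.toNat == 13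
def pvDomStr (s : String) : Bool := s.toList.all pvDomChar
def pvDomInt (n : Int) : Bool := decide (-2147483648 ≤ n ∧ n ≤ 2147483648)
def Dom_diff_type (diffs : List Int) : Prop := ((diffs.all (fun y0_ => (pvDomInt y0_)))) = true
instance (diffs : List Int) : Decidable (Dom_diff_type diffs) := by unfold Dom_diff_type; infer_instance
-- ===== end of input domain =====

-- B recomputes the same four counts with independent per-bucket filter scans (big bucket by subtraction) instead of A's single branching accumulator pass; same cost, different decomposition.
-- ===== PORT A =====
def diff_type (diffs : List Int) : Int × Int × Int × Int :=
  diffs.foldl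
    (fun s diff =>
      let (pos_diffs, neg_diffs, non_diffs, big_diffs) := s
      if 1 ≤ diff ∧ diff ≤ 3 then (pos_diffs + 1, neg_diffs, non_diffs, big_diffs)
      else if -3 ≤ diff ∧ diff ≤ -1 then (pos_diffs, neg_diffs + 1, non_diffs, big_diffs)
      else if diff = 0 then (pos_diffs, neg_diffs, non_diffs + 1, big_diffs)
      else (pos_diffs, neg_diffs, non_diffs, big_diffs + 1))
    (0, 0, 0, 0)

-- ===== PORT B =====
-- B: independent per-bucket scans; the big bucket is length minus the other three.
def diff_type_alt (diffs : List Int) : Int × Int × Int × Int :=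
  let items := diffs
  let pos : Int := (items.filter (fun d => 1 ≤ d ∧ d ≤ 3)).length
  let neg : Int := (items.filter (fun d => -3 ≤ d ∧ d ≤ -1)).length
  let non : Int := (items.filter (fun d => d = 0)).length
  let big : Int := (items.length : Int) - pos - neg - non
  (pos, neg, non, big)

-- ===== PRECONDITION & SPEC =====
def Spec_diff_type (diffs : List Int) (out : Int × Int × Int × Int) : Prop := out = diff_type_alt diffs
instance (diffs : List Int) (out : Int × Int × Int × Int) : Decidable (Spec_diff_type diffs out) := by unfold Spec_diff_type; infer_instance

-- ===== CLAIM (what is proved, stated in full; the proofs are below) =====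
def Claim_equal_diff_type : Prop := ∀ (diffs : List Int), Dom_diff_type diffs → Spec_diff_type diffs (diff_type diffs)

-- ===== LEMMAS AND PROOFS =====

-- ===== VERDICT (by name: the statement is the Claim_ definition above) =====
theorem diff_type_step (l : List Int) (p n z b : Int) :
    l.foldl
      (fun s diff =>
        let (pos_diffs, neg_diffs, non_diffs, big_diffs) := s
        if 1 ≤ diff ∧ diff ≤ 3 then (pos_diffs + 1, neg_diffs, non_diffs, big_diffs)
        else if -3 ≤ diff ∧ diff ≤ -1 then (pos_diffs, neg_diffs + 1, non_diffs, big_diffs)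
        else if diff = 0 then (pos_diffs, neg_diffs, non_diffs + 1, big_diffs)
        else (pos_diffs, neg_diffs, non_diffs, big_diffs + 1))
      (p, n, z, b) =
    (p + (l.filter (fun d => 1 ≤ d ∧ d ≤ 3)).length,
     n + (l.filter (fun d => -3 ≤ d ∧ d ≤ -1)).length,
     z + (l.filter (fun d => d = 0)).length,
     b + ((l.length : Int)
        - (l.filter (fun d => 1 ≤ d ∧ d ≤ 3)).length
        - (l.filter (fun d => -3 ≤ d ∧ d ≤ -1)).length
        - (l.filter (fun d => d = 0)).length)) := by
  induction l generalizing p n z b with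
  | nil => simp
  | cons x xs ih =>
    simp only [List.foldl_cons, List.filter_cons, List.length_cons]
    by_cases h1 : 1 ≤ x ∧ x ≤ 3
    · have hn : ¬(-3 ≤ x ∧ x ≤ -1) := by omega
      have hz : x ≠ 0 := by omega
      simp [h1, hn, hz, ih, Prod.ext_iff]
      push_cast; and_intros <;> ring
    · by_cases h2 : -3 ≤ x ∧ x ≤ -1
      · have hz : x ≠ 0 := by omega
        simp [h1, h2, hz, ih, Prod.ext_iff]
        push_cast; and_intros <;> ring
      · by_cases h3 : x = 0
        · simp [h1, h2, h3, ih, Prod.ext_iff]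
          push_cast; and_intros <;> ring
        · simp [h1, h2, h3, ih, Prod.ext_iff]
          push_cast; and_intros <;> ring

theorem diff_type_spec : Claim_equal_diff_type := by
  intro diffs _
  unfold Spec_diff_type diff_type diff_type_alt
  rw [diff_type_step]
  simp
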